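-- pv_equiv track=rewrite | github.com/WangBaoHe333/political-news | app/routers/web.py | _render_year_select
-- ===== SOURCE A (Python) =====
-- from typing import Dict, Iterable, List, Optional, Sequence, Tuple
--
-- MIN_FILTER_YEAR = 2025
--
-- def _visible_years(year_counts: Dict[int, int], current_year: int, selected_year: Optional[int] = None) -> List[int]:
--     years = set(range(current_year, MIN_FILTER_YEAR - 1, -1))
--     years.update(year for year in year_counts if year >= MIN_FILTER_YEAR)
--     if selected_year:
--         years.add(selected_year)
--     return sorted((year for year in years if year >= MIN_FILTER_YEAR), reverse=True)
--
-- def _render_year_select(year_counts: Dict[int, int], current_year: int, selected_year: Optional[int]) -> str: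
--     effective_year = selected_year or current_year
--     options = []
--     for year in _visible_years(year_counts, current_year, effective_year):
--         selected = " selected" if year == effective_year else ""
--         count_text = f" ({year_counts.get(year, 0)})" if year_counts.get(year, 0) else ""
--         options.append(f"<option value='{year}'{selected}>{year}年{count_text}</option>")
--     return "".join(options)
-- ===== SOURCE B (Python) =====
-- MIN_FILTER_YEAR = 2025
--
-- def _render_year_select(year_counts, current_year, selected_year):
--     effective_year = selected_year or current_year
--     top = max(current_year, MIN_FILTER_YEAR - 1)
--     extras = {year for year in year_counts if year > top}
--     if effective_year > top:
--         extras.add(effective_year)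
--     years = sorted(extras, reverse=True)
--     years.extend(range(top, MIN_FILTER_YEAR - 1, -1))
--     parts = []
--     for year in years:
--         selected = " selected" if year == effective_year else ""
--         count = year_counts.get(year, 0)
--         count_text = f" ({count})" if count else ""
--         parts.append(f"<option value='{year}'{selected}>{year}年{count_text}</option>")
--     return "".join(parts)
-- ===== Notes on version B (the rewrite author's own statement) =====
-- stated objective: alternative
-- what changed: Instead of building one set of every year in the range plus the counted/selected years, filtering and reverse-sorting it all, B emits the contiguous block [MIN_FILTER_YEAR..current_year] directly as a descending range and prepends only the sparse years above that block (dict keys and the effective year), so only those few extras are deduplicated and sorted.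
import Mathlib
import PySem

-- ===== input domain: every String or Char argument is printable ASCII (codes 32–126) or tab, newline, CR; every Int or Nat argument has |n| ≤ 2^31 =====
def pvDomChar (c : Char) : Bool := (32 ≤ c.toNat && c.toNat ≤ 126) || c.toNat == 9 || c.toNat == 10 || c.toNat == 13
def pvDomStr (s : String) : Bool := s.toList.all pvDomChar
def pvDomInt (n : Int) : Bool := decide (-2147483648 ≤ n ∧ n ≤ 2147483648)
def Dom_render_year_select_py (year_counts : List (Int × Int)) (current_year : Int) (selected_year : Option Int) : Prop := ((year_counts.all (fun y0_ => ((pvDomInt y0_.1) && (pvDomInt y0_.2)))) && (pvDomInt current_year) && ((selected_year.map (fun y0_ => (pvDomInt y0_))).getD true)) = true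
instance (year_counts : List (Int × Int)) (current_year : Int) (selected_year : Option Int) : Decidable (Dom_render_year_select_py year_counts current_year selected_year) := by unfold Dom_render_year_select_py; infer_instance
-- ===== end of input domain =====

-- B skips A's set-union-and-sort over the whole year span: it emits the contiguous block
-- [MIN_FILTER_YEAR..current_year] directly as a descending range and prepends only the sparse
-- years above it (counted years / effective year), sorted descending (objective: alternative).

-- ===== PORT A =====
-- helper: Python f-string for one <option> line (A's loop body)
def pvOptA (d : PySem.Dict Int Int) (effective_year year : Int) : String :=
  let selected : String := if year = effective_year then " selected" else ""
  let cnt : Int := d.getD year 0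
  let count_text : String := if cnt ≠ 0 then " (" ++ PySem.Int.toStr cnt ++ ")" else ""
  "<option value='" ++ PySem.Int.toStr year ++ "'" ++ selected ++ ">" ++ PySem.Int.toStr year ++ "年" ++ count_text ++ "</option>"

-- helper: _visible_years (called by A with selected_year = effective_year, an int; truthiness = ≠ 0)
def pvVisibleYears (d : PySem.Dict Int Int) (current_year selected_year : Int) : List Int :=
  let years : PySem.Set Int := PySem.Set.ofList (PySem.List.pyRange current_year (2025 - 1) (-1))
  let years : PySem.Set Int := PySem.Set.update years (d.keys.filter (fun year => decide (2025 ≤ year)))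
  let years : PySem.Set Int := if selected_year ≠ 0 then PySem.Set.add years selected_year else years
  PySem.List.sorted (years.filter (fun year => decide (2025 ≤ year))) (fun x => x) true

def render_year_select_py (year_counts : List (Int × Int)) (current_year : Int) (selected_year : Option Int) : String :=
  let d := PySem.Dict.ofList year_counts
  let effective_year := match selected_year with
    | some s => if s ≠ 0 then s else current_year
    | none => current_year
  let options := (pvVisibleYears d current_year effective_year).foldl
    (fun acc year => acc ++ [pvOptA d effective_year year]) []
  PySem.Str.join "" options

-- ===== PORT B =====
-- helper: the same f-string in B's loop body
def pvOptB (d : PySem.Dict Int Int) (effective_year year : Int) : String :=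
  let selected : String := if year = effective_year then " selected" else ""
  let cnt : Int := d.getD year 0
  let count_text : String := if cnt ≠ 0 then " (" ++ PySem.Int.toStr cnt ++ ")" else ""
  "<option value='" ++ PySem.Int.toStr year ++ "'" ++ selected ++ ">" ++ PySem.Int.toStr year ++ "年" ++ count_text ++ "</option>"

def render_year_select_py_alt (year_counts : List (Int × Int)) (current_year : Int) (selected_year : Option Int) : String :=
  let d := PySem.Dict.ofList year_counts
  let effective_year := match selected_year with
    | some s => if s ≠ 0 then s else current_year
    | none => current_year
  let top := max current_year (2025 - 1)
  let extras : PySem.Set Int := PySem.Set.ofList (d.keys.filter (fun year => decide (top < year)))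
  let extras : PySem.Set Int := if top < effective_year then PySem.Set.add extras effective_year else extras
  let years := PySem.List.sorted extras (fun x => x) true ++ PySem.List.pyRange top (2025 - 1) (-1)
  let parts := years.foldl (fun acc year => acc ++ [pvOptB d effective_year year]) []
  PySem.Str.join "" parts

-- ===== PRECONDITION & SPEC =====
def Spec_render_year_select_py (year_counts : List (Int × Int)) (current_year : Int) (selected_year : Option Int) (out : String) : Prop := out = render_year_select_py_alt year_counts current_year selected_year
instance (year_counts : List (Int × Int)) (current_year : Int) (selected_year : Option Int) (out : String) : Decidable (Spec_render_year_select_py year_counts current_year selected_year out) := by unfold Spec_render_year_select_py; infer_instance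

-- ===== CLAIM (what is proved, stated in full; the proofs are below) =====
def Claim_equal_render_year_select_py : Prop := ∀ (year_counts : List (Int × Int)) (current_year : Int) (selected_year : Option Int), Dom_render_year_select_py year_counts current_year selected_year → Spec_render_year_select_py year_counts current_year selected_year (render_year_select_py year_counts current_year selected_year)

-- ===== LEMMAS AND PROOFS =====

-- A's visible-years list IS B's filtered descending range
theorem pvVisibleYears_eq (d : PySem.Dict Int Int) (cur eff : Int) :
    pvVisibleYears d cur eff =
      PySem.List.sorted
        (if max cur (2025 - 1) < eff then
          PySem.Set.add (PySem.Set.ofList (d.keys.filter (fun year => decide (max cur (2025 - 1) < year)))) eff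
         else PySem.Set.ofList (d.keys.filter (fun year => decide (max cur (2025 - 1) < year))))
        (fun x => x) true ++ PySem.List.pyRange (max cur (2025 - 1)) (2025 - 1) (-1) := by
  set top := max cur (2025 - 1) with htop
  have hT1 : cur ≤ top := htop ▸ le_max_left _ _
  have hT2 : 2025 - 1 ≤ top := htop ▸ le_max_right _ _
  have hT3 : top = cur ∨ top = 2025 - 1 := htop ▸ max_choice _ _
  set extras := (if top < eff then
      PySem.Set.add (PySem.Set.ofList (d.keys.filter (fun year => decide (top < year)))) eff
    else PySem.Set.ofList (d.keys.filter (fun year => decide (top < year)))) with hextras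
  have hne : extras.Nodup := by
    rw [hextras]; split
    · exact PySem.Set.nodup_add _ _ (PySem.Set.nodup_ofList _)
    · exact PySem.Set.nodup_ofList _
  have hmem : ∀ y, y ∈ extras ↔ (y ∈ d.keys ∧ top < y) ∨ (top < eff ∧ y = eff) := by
    intro y; rw [hextras]
    by_cases h : top < eff
    · simp only [if_pos h, PySem.Set.mem_add, PySem.Set.mem_ofList, List.mem_filter,
        decide_eq_true_eq]
      tauto
    · simp only [if_neg h, PySem.Set.mem_ofList, List.mem_filter, decide_eq_true_eq]
      tauto
  have hpw : List.Pairwise (fun a b => b < a)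
      (PySem.List.sorted extras (fun x => x) true ++ PySem.List.pyRange top (2025 - 1) (-1)) := by
    rw [List.pairwise_append]
    refine ⟨?_, ?_, ?_⟩
    · have h1 := PySem.List.sorted_pairwise_rev extras (fun x => x)
      have h2 : (PySem.List.sorted extras (fun x => x) true).Nodup :=
        (PySem.List.sorted_perm extras (fun x => x) true).nodup_iff.mpr hne
      exact (h1.and h2).imp (fun h => lt_of_le_of_ne h.1 (Ne.symm h.2))
    · rw [PySem.List.pyRange_neg_one_eq_reverse, List.pairwise_reverse]
      exact PySem.List.pairwise_lt_pyRange_one _ _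
    · intro a ha b hb
      rw [PySem.List.mem_sorted, hmem] at ha
      rw [PySem.List.mem_pyRange_neg_one] at hb
      rcases ha with ⟨_, h⟩ | ⟨h1, h2⟩ <;> omega
  unfold pvVisibleYears
  apply PySem.List.sorted_rev_eq_of_perm_of_pairwise_gt _ _ _ _ hpw
  -- permutation: both sides are Nodup with the same members
  have hn1 : (PySem.List.sorted extras (fun x => x) true ++
      PySem.List.pyRange top (2025 - 1) (-1)).Nodup :=
    hpw.imp (fun h => (ne_of_lt h).symm)
  have hn2 : (if eff ≠ 0 then
      PySem.Set.add (PySem.Set.update (PySem.Set.ofList (PySem.List.pyRange cur (2025 - 1) (-1)))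
        (d.keys.filter (fun year => decide (2025 ≤ year)))) eff
    else PySem.Set.update (PySem.Set.ofList (PySem.List.pyRange cur (2025 - 1) (-1)))
        (d.keys.filter (fun year => decide (2025 ≤ year)))).Nodup := by
    split
    · exact PySem.Set.nodup_add _ _ (PySem.Set.nodup_update _ _ (PySem.Set.nodup_ofList _))
    · exact PySem.Set.nodup_update _ _ (PySem.Set.nodup_ofList _)
  rw [List.perm_ext_iff_of_nodup hn1 (List.Nodup.filter _ hn2)]
  intro y
  rw [List.mem_append, PySem.List.mem_sorted, hmem, PySem.List.mem_pyRange_neg_one]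
  by_cases hs : eff = 0
  · rw [if_neg (not_not_intro hs)]
    simp only [List.mem_filter, PySem.Set.mem_update, PySem.Set.mem_ofList,
      PySem.List.mem_pyRange_neg_one, decide_eq_true_eq]
    constructor
    · rintro ((⟨h1, h2⟩ | ⟨h1, h2⟩) | ⟨h1, h2⟩)
      · exact ⟨Or.inr ⟨h1, by omega⟩, by omega⟩
      · exact absurd h1 (by omega)
      · exact ⟨Or.inl ⟨by omega, by omega⟩, by omega⟩
    · rintro ⟨⟨h1, h2⟩ | ⟨h1, h2⟩, h3⟩
      · exact Or.inr ⟨by omega, by omega⟩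
      · by_cases h : top < y
        · exact Or.inl (Or.inl ⟨h1, h⟩)
        · exact Or.inr ⟨by omega, by omega⟩
  · rw [if_pos hs]
    simp only [List.mem_filter, PySem.Set.mem_add, PySem.Set.mem_update, PySem.Set.mem_ofList,
      PySem.List.mem_pyRange_neg_one, decide_eq_true_eq]
    constructor
    · rintro ((⟨h1, h2⟩ | ⟨h1, h2⟩) | ⟨h1, h2⟩)
      · exact ⟨Or.inl (Or.inr ⟨h1, by omega⟩), by omega⟩
      · exact ⟨Or.inr h2, by omega⟩
      · exact ⟨Or.inl (Or.inl ⟨by omega, by omega⟩), by omega⟩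
    · rintro ⟨(⟨h1, h2⟩ | ⟨h1, h2⟩) | h1, h3⟩
      · exact Or.inr ⟨by omega, by omega⟩
      · by_cases h : top < y
        · exact Or.inl (Or.inl ⟨h1, h⟩)
        · exact Or.inr ⟨by omega, by omega⟩
      · by_cases h : top < y
        · exact Or.inl (Or.inr ⟨by omega, h1⟩)
        · exact Or.inr ⟨by omega, by omega⟩

-- ===== VERDICT (by name: the statement is the Claim_ definition above) =====
theorem render_year_select_py_spec : Claim_equal_render_year_select_py := by
  intro year_counts current_year selected_year _
  unfold Spec_render_year_select_py render_year_select_py render_year_select_py_alt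
  simp only [PySem.List.foldl_append_singleton_eq_map, List.nil_append]
  rw [pvVisibleYears_eq]
  rfl
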